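-- pv_equiv track=rewrite | github.com/Averbea/AdventOfCode | 2021/05/solution.py | set_lines
-- ===== SOURCE A (Python) =====
-- def set_lines(ocean, geysirlines, consider_diagonal=False):
--     for line in geysirlines:
--         (fromx, fromy) = line["from"]
--         (tox, toy) = line["to"]
--
--         if fromx == tox:
--             a = fromy if fromy < toy else toy
--             b = toy + 1 if fromy < toy else fromy + 1
--             for i in range(a, b):
--                 ocean[i][fromx] += 1
--         elif fromy == toy:
--             a = fromx if fromx < tox else tox
--             b = tox + 1 if fromx < tox else fromx + 1
--             for i in range(a, b):
--                 ocean[fromy][i] += 1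
--         else:
--             if consider_diagonal:
--                 stepx, stepy = 1, 1
--                 if fromx > tox:
--                     stepx = -1
--                 if fromy > toy:
--                     stepy = -1
--
--                 while (1):
--                     ocean[fromy][fromx] += 1
--                     if fromx == tox:
--                         break
--                     fromx += stepx
--                     fromy += stepy
--
--     return ocean
-- ===== SOURCE B (Python) =====
-- def set_lines(ocean, geysirlines, consider_diagonal=False):
--     # Two-phase: tally every marked cell in a counter dict first, then apply
--     # each cell's total to the grid in one pass (instead of bumping the grid
--     # cell by cell while walking each line).
--     counts = {}
--     for line in geysirlines:
--         (fromx, fromy) = line["from"]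
--         (tox, toy) = line["to"]
--         sx = (tox > fromx) - (tox < fromx)
--         sy = (toy > fromy) - (toy < fromy)
--         if sx != 0 and sy != 0 and not consider_diagonal:
--             continue
--         n = abs(tox - fromx) or abs(toy - fromy)
--         for k in range(n + 1):
--             cell = (fromy + k * sy, fromx + k * sx)
--             counts[cell] = counts.get(cell, 0) + 1
--     for (y, x), c in counts.items():
--         ocean[y][x] += c
--     return ocean
-- ===== Notes on version B (the rewrite author's own statement) =====
-- stated objective: alternative
-- what changed: Instead of incrementing grid cells in place while walking each line through three per-orientation branches, B first tallies every touched cell into a counter dict (one unified cell generator per line) and then applies each cell's total count to the grid in a single final pass; correctness rests on increments commuting, so the multiset of touched cells determines the result.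
import Mathlib
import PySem

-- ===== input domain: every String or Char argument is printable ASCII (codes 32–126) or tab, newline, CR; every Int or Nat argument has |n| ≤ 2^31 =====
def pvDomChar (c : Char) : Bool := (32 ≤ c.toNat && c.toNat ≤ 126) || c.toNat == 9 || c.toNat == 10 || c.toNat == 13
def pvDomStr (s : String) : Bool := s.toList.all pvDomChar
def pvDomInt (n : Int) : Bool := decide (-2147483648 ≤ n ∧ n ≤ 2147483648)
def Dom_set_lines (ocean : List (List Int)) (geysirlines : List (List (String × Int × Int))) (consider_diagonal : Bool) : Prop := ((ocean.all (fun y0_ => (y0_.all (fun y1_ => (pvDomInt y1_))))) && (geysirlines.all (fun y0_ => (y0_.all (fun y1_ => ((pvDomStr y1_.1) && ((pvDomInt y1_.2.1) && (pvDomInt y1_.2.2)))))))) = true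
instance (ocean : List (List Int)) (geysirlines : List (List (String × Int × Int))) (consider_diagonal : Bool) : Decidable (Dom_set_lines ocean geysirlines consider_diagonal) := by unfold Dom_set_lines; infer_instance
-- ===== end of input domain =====

-- B replaces A's in-place per-branch marking by a two-phase algorithm: tally every touched
-- cell into a counter dict, then apply the totals to the grid in one final pass (objective:
-- alternative). Both Pythons mutate `ocean` in place; the equivalence proved is about the
-- return value.

-- shared helpers: both Pythons execute 'line["from"]' and index 'ocean[y][x]'
-- first-match lookup in the dict (association list)
def lookupKey : List (String × Int × Int) → String → Option (Int × Int)
  | [], _ => none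
  | (s, p) :: t, k => if s = k then some p else lookupKey t k

-- Python index resolution (negative = from the end); none = IndexError (excluded by Pre_)
def pyIdxN (len : Nat) (i : Int) : Option Nat :=
  if 0 ≤ i ∧ i < (len : Int) then some i.toNat
  else if -(len : Int) ≤ i ∧ i < 0 then some (i + len).toNat else none

-- ===== PORT A =====
def bumpRow : List Int → Nat → List Int
  | [], _ => []
  | a :: t, 0 => (a + 1) :: t
  | a :: t, n + 1 => a :: bumpRow t n

def bumpGrid : List (List Int) → Nat → Nat → List (List Int)
  | [], _, _ => []
  | r :: t, 0, x => bumpRow r x :: t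
  | r :: t, y + 1, x => r :: bumpGrid t y x

-- 'ocean[y][x] += 1' with Python index semantics; on IndexError (outside Pre_) leaves the grid unchanged
def incr (g : List (List Int)) (y x : Int) : List (List Int) :=
  match pyIdxN g.length y with
  | none => g
  | some j =>
    match pyIdxN (g.getD j []).length x with
    | none => g
    | some jx => bumpGrid g j jx

-- the 'while (1)' diagonal loop; fuel = |tox-fromx|+1 exactly covers the iterations Python performs
def diagA : Nat → List (List Int) → Int → Int → Int → Int → Int → List (List Int)
  | 0, g, _, _, _, _, _ => g
  | fuel + 1, g, fromx, fromy, tox, stepx, stepy =>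
    let g := incr g fromy fromx
    if fromx = tox then g
    else diagA fuel g (fromx + stepx) (fromy + stepy) tox stepx stepy

def stepA (consider_diagonal : Bool) (ocean : List (List Int)) (line : List (String × Int × Int)) : List (List Int) :=
  match lookupKey line "from", lookupKey line "to" with
  | some (fromx, fromy), some (tox, toy) =>
    if fromx = tox then
      let a := if fromy < toy then fromy else toy
      let b := if fromy < toy then toy + 1 else fromy + 1
      (PySem.List.pyRange a b 1).foldl (fun oc i => incr oc i fromx) ocean
    else if fromy = toy then
      let a := if fromx < tox then fromx else tox
      let b := if fromx < tox then tox + 1 else fromx + 1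
      (PySem.List.pyRange a b 1).foldl (fun oc i => incr oc fromy i) ocean
    else
      if consider_diagonal then
        let stepx : Int := if fromx > tox then -1 else 1
        let stepy : Int := if fromy > toy then -1 else 1
        diagA ((tox - fromx).natAbs + 1) ocean fromx fromy tox stepx stepy
      else ocean
  | _, _ => ocean   -- KeyError in Python; excluded by Pre_

def set_lines (ocean : List (List Int)) (geysirlines : List (List (String × Int × Int))) (consider_diagonal : Bool) : List (List Int) :=
  geysirlines.foldl (stepA consider_diagonal) ocean

-- ===== PORT B =====
-- '(tox > fromx) - (tox < fromx)'
def sgnB (a b : Int) : Int := (if b < a then 1 else 0) - (if a < b then 1 else 0)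

-- counts[cell] = counts.get(cell, 0) + 1 over the cells of one line
def counterStep (consider_diagonal : Bool) (d : PySem.Dict (Int × Int) Int) (line : List (String × Int × Int)) : PySem.Dict (Int × Int) Int :=
  match lookupKey line "from", lookupKey line "to" with
  | some (fromx, fromy), some (tox, toy) =>
    let sx := sgnB tox fromx
    let sy := sgnB toy fromy
    if sx ≠ 0 ∧ sy ≠ 0 ∧ consider_diagonal = false then d
    else
      -- 'abs(tox - fromx) or abs(toy - fromy)'
      let n : Int := if (tox - fromx).natAbs ≠ 0 then ((tox - fromx).natAbs : Int) else ((toy - fromy).natAbs : Int)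
      (PySem.List.pyRange 0 (n + 1) 1).foldl
        (fun d k =>
          let cell := (fromy + k * sy, fromx + k * sx)
          d.insert cell (d.getD cell 0 + 1)) d
  | _, _ => d   -- KeyError in Python; excluded by Pre_

def bumpRowBy : List Int → Nat → Int → List Int
  | [], _, _ => []
  | a :: t, 0, c => (a + c) :: t
  | a :: t, n + 1, c => a :: bumpRowBy t n c

def bumpGridBy : List (List Int) → Nat → Nat → Int → List (List Int)
  | [], _, _, _ => []
  | r :: t, 0, x, c => bumpRowBy r x c :: t
  | r :: t, y + 1, x, c => r :: bumpGridBy t y x c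

-- 'ocean[y][x] += c' with Python index semantics; on IndexError (outside Pre_) leaves the grid unchanged
def addCell (g : List (List Int)) (y x c : Int) : List (List Int) :=
  match pyIdxN g.length y with
  | none => g
  | some j =>
    match pyIdxN (g.getD j []).length x with
    | none => g
    | some jx => bumpGridBy g j jx c

def set_lines_alt (ocean : List (List Int)) (geysirlines : List (List (String × Int × Int))) (consider_diagonal : Bool) : List (List Int) :=
  let counts := geysirlines.foldl (counterStep consider_diagonal) PySem.Dict.empty
  counts.items.foldl (fun g p => addCell g p.1.1 p.1.2 p.2) ocean

-- ===== PRECONDITION & SPEC =====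
-- every i in [lo, hi] is a valid (possibly negative) Python index for length len
def idxInterval (len : Nat) (lo hi : Int) : Bool := decide (-(len : Int) ≤ lo ∧ hi < (len : Int))

-- does Python A survive this line? (bounds check first so huge out-of-range lines decide fast)
def preLine (ocean : List (List Int)) (line : List (String × Int × Int)) (cons : Bool) : Bool :=
  match (line.map (fun e => (e.1, e.2))).lookup "from", (line.map (fun e => (e.1, e.2))).lookup "to" with
  | some (fx, fy), some (tox, toy) =>
    if fx = tox then
      if idxInterval ocean.length (min fy toy) (max fy toy) then
        (PySem.List.pyRange (min fy toy) (max fy toy + 1) 1).all (fun i =>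
          match PySem.List.pyGet? ocean i with
          | some row => decide (PySem.Raise.InRange row.length fx)
          | none => false)
      else false
    else if fy = toy then
      match PySem.List.pyGet? ocean fy with
      | some row => idxInterval row.length (min fx tox) (max fx tox)
      | none => false
    else if cons then
      let n := (tox - fx).natAbs
      let sy : Int := if fy < toy then 1 else -1
      if idxInterval ocean.length (min fy (fy + (n : Int) * sy)) (max fy (fy + (n : Int) * sy)) then
        (List.range (n + 1)).all (fun k =>
          match PySem.List.pyGet? ocean (fy + (k : Int) * sy) with
          | some row => decide (PySem.Raise.InRange row.length (fx + (k : Int) * (if fx < tox then 1 else -1)))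
          | none => false)
      else false
    else true
  | _, _ => false

-- Pre_ holds exactly when Python A returns normally: both keys "from"/"to" are present in every
-- line and every touched cell is a valid (possibly negative) Python index into ocean (else KeyError/IndexError).
def Pre_set_lines (ocean : List (List Int)) (geysirlines : List (List (String × Int × Int))) (consider_diagonal : Bool) : Prop :=
  geysirlines.all (fun line => preLine ocean line consider_diagonal) = true
instance (ocean : List (List Int)) (geysirlines : List (List (String × Int × Int))) (consider_diagonal : Bool) : Decidable (Pre_set_lines ocean geysirlines consider_diagonal) := by unfold Pre_set_lines; infer_instance

def pvWitness_set_lines : List (List Int) × (List (List (String × Int × Int))) × Bool :=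
  ([[0, 0], [0, 0]], [[("from", 0, 1), ("to", 1, 0)]], true)

def Spec_set_lines (ocean : List (List Int)) (geysirlines : List (List (String × Int × Int))) (consider_diagonal : Bool) (out : List (List Int)) : Prop := out = set_lines_alt ocean geysirlines consider_diagonal
instance (ocean : List (List Int)) (geysirlines : List (List (String × Int × Int))) (consider_diagonal : Bool) (out : List (List Int)) : Decidable (Spec_set_lines ocean geysirlines consider_diagonal out) := by unfold Spec_set_lines; infer_instance

-- ===== CLAIM (what is proved, stated in full; the proofs are below) =====
def Claim_equal_set_lines : Prop := ∀ (ocean : List (List Int)) (geysirlines : List (List (String × Int × Int))) (consider_diagonal : Bool), Dom_set_lines ocean geysirlines consider_diagonal → Pre_set_lines ocean geysirlines consider_diagonal → Spec_set_lines ocean geysirlines consider_diagonal (set_lines ocean geysirlines consider_diagonal)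

-- ===== LEMMAS AND PROOFS =====
-- the list of cells B's counter phase records for one line (proof-side description)
def cellsB (cons : Bool) (line : List (String × Int × Int)) : List (Int × Int) :=
  match lookupKey line "from", lookupKey line "to" with
  | some (fromx, fromy), some (tox, toy) =>
    let sx := sgnB tox fromx
    let sy := sgnB toy fromy
    if sx ≠ 0 ∧ sy ≠ 0 ∧ cons = false then []
    else
      let n : Int := if (tox - fromx).natAbs ≠ 0 then ((tox - fromx).natAbs : Int) else ((toy - fromy).natAbs : Int)
      (PySem.List.pyRange 0 (n + 1) 1).map (fun k => (fromy + k * sy, fromx + k * sx))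
  | _, _ => []

-- fold over a cell list with unit increments
def CF (g : List (List Int)) (l : List (Int × Int)) : List (List Int) :=
  l.foldl (fun g c => incr g c.1 c.2) g

theorem bumpRow_length (r : List Int) (j : Nat) : (bumpRow r j).length = r.length := by
  induction r generalizing j with
  | nil => rfl
  | cons a t ih => cases j <;> simp [bumpRow, ih]

theorem bumpGrid_length (g : List (List Int)) (j jx : Nat) : (bumpGrid g j jx).length = g.length := by
  induction g generalizing j with
  | nil => rfl
  | cons r t ih => cases j <;> simp [bumpGrid, ih]

theorem bumpGrid_row_length (g : List (List Int)) (j jx j' : Nat) :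
    ((bumpGrid g j jx).getD j' []).length = (g.getD j' []).length := by
  induction g generalizing j j' with
  | nil => rfl
  | cons r t ih =>
    cases j with
    | zero => cases j' <;> simp [bumpGrid, bumpRow_length, List.getD]
    | succ j =>
      cases j' with
      | zero => simp [bumpGrid, List.getD]
      | succ n => simpa [bumpGrid, List.getD] using ih j n

theorem bumpRow_comm (r : List Int) (j1 j2 : Nat) :
    bumpRow (bumpRow r j1) j2 = bumpRow (bumpRow r j2) j1 := by
  induction r generalizing j1 j2 with
  | nil => rfl
  | cons a t ih => cases j1 <;> cases j2 <;> simp [bumpRow, ih]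

theorem bumpGrid_comm (g : List (List Int)) (j1 x1 j2 x2 : Nat) :
    bumpGrid (bumpGrid g j1 x1) j2 x2 = bumpGrid (bumpGrid g j2 x2) j1 x1 := by
  induction g generalizing j1 j2 with
  | nil => rfl
  | cons r t ih => cases j1 <;> cases j2 <;> simp [bumpGrid, ih, bumpRow_comm]

theorem incr_eq_none1 {g : List (List Int)} {y : Int} (x : Int)
    (h : pyIdxN g.length y = none) : incr g y x = g := by simp [incr, h]

theorem incr_eq_none2 {g : List (List Int)} {y x : Int} {j : Nat}
    (h1 : pyIdxN g.length y = some j) (h2 : pyIdxN (g.getD j []).length x = none) :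
    incr g y x = g := by unfold incr; rw [h1]; dsimp only; rw [h2]

theorem incr_eq_some {g : List (List Int)} {y x : Int} {j jx : Nat}
    (h1 : pyIdxN g.length y = some j) (h2 : pyIdxN (g.getD j []).length x = some jx) :
    incr g y x = bumpGrid g j jx := by unfold incr; rw [h1]; dsimp only; rw [h2]

theorem incr_length (g : List (List Int)) (y x : Int) : (incr g y x).length = g.length := by
  unfold incr
  split
  · rfl
  · split
    · rfl
    · exact bumpGrid_length g _ _

theorem incr_row_length (g : List (List Int)) (y x : Int) (j' : Nat) :
    ((incr g y x).getD j' []).length = (g.getD j' []).length := by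
  unfold incr
  split
  · rfl
  · split
    · rfl
    · exact bumpGrid_row_length g _ _ _

theorem incr_comm (g : List (List Int)) (y1 x1 y2 x2 : Int) :
    incr (incr g y1 x1) y2 x2 = incr (incr g y2 x2) y1 x1 := by
  cases h1 : pyIdxN g.length y1 with
  | none =>
    rw [incr_eq_none1 x1 h1, incr_eq_none1 x1 (by rw [incr_length]; exact h1)]
  | some j1 =>
    cases hx1 : pyIdxN (g.getD j1 []).length x1 with
    | none =>
      rw [incr_eq_none2 h1 hx1,
          incr_eq_none2 (g := incr g y2 x2) (j := j1) (by rw [incr_length]; exact h1)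
            (by rw [incr_row_length]; exact hx1)]
    | some jx1 =>
      rw [incr_eq_some h1 hx1]
      cases h2 : pyIdxN g.length y2 with
      | none =>
        rw [incr_eq_none1 x2 (by rw [bumpGrid_length]; exact h2), incr_eq_none1 x2 h2,
            incr_eq_some h1 hx1]
      | some j2 =>
        cases hx2 : pyIdxN (g.getD j2 []).length x2 with
        | none =>
          rw [incr_eq_none2 (g := bumpGrid g j1 jx1) (j := j2)
                (by rw [bumpGrid_length]; exact h2) (by rw [bumpGrid_row_length]; exact hx2),
              incr_eq_none2 h2 hx2, incr_eq_some h1 hx1]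
        | some jx2 =>
          rw [incr_eq_some (g := bumpGrid g j1 jx1) (j := j2)
                (by rw [bumpGrid_length]; exact h2) (by rw [bumpGrid_row_length]; exact hx2),
              incr_eq_some h2 hx2,
              incr_eq_some (g := bumpGrid g j2 jx2) (j := j1)
                (by rw [bumpGrid_length]; exact h1) (by rw [bumpGrid_row_length]; exact hx1),
              bumpGrid_comm]

theorem CF_append (g : List (List Int)) (l1 l2 : List (Int × Int)) :
    CF g (l1 ++ l2) = CF (CF g l1) l2 := by
  simp [CF, List.foldl_append]

theorem CF_perm (g : List (List Int)) {l l' : List (Int × Int)} (p : l.Perm l') :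
    CF g l = CF g l' := by
  exact p.foldl_eq' (fun x _ y _ z => incr_comm z x.1 x.2 y.1 y.2) g

theorem CF_incr_out (g : List (List Int)) (l : List (Int × Int)) (y x : Int) :
    CF (incr g y x) l = incr (CF g l) y x := by
  induction l generalizing g with
  | nil => rfl
  | cons c t ih =>
    show CF (incr (incr g y x) c.1 c.2) t = incr (CF (incr g c.1 c.2) t) y x
    rw [incr_comm]
    exact ih _

theorem CF_reverse (g : List (List Int)) (l : List (Int × Int)) :
    CF g l.reverse = CF g l := by
  induction l generalizing g with
  | nil => rfl
  | cons c t ih =>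
    show CF g ((c :: t).reverse) = CF (incr g c.1 c.2) t
    rw [List.reverse_cons, CF_append, ih, CF_incr_out]
    rfl

theorem sgnB_pos {a b : Int} (h : b < a) : sgnB a b = 1 := by
  simp [sgnB, h, not_lt.2 (le_of_lt h)]
theorem sgnB_neg {a b : Int} (h : a < b) : sgnB a b = -1 := by
  simp [sgnB, h, not_lt.2 (le_of_lt h)]
theorem sgnB_self (a : Int) : sgnB a a = 0 := by simp [sgnB]

theorem map_range_reverse {α : Type} (m : Nat) (f : Nat → α) :
    ((List.range m).map f).reverse = (List.range m).map (fun k => f (m - 1 - k)) := by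
  apply List.ext_getElem
  · simp
  · intro i h1 h2
    simp only [List.getElem_reverse, List.getElem_map, List.getElem_range,
      List.length_map, List.length_range] at *

theorem CF_range_reverse (m : Nat) (f : Nat → Int × Int) (g : List (List Int)) :
    CF g ((List.range m).map f) = CF g ((List.range m).map (fun k => f (m - 1 - k))) := by
  rw [← CF_reverse g ((List.range m).map f), map_range_reverse]

theorem diagA_eq (d : Nat) (g : List (List Int)) (fx fy sx sy : Int) (hsx : sx = 1 ∨ sx = -1) :
    diagA (d + 1) g fx fy (fx + d * sx) sx sy
      = CF g ((List.range (d + 1)).map (fun k : Nat => (fy + (k : Int) * sy, fx + (k : Int) * sx))) := by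
  induction d generalizing g fx fy with
  | zero => simp [diagA, CF]
  | succ d ih =>
    have hne : fx ≠ fx + (↑(d + 1)) * sx := by rcases hsx with h | h <;> simp [h] <;> omega
    rw [diagA]
    simp only [if_neg hne]
    have harg : fx + (↑(d + 1) : Int) * sx = (fx + sx) + (↑d : Int) * sx := by push_cast; ring
    rw [harg, ih (incr g fy fx) (fx + sx) (fy + sy)]
    conv_rhs => rw [List.range_succ_eq_map]
    simp only [List.map_cons, List.map_map]
    have hc : ((fy : Int) + ((0 : Nat) : Int) * sy, (fx : Int) + ((0 : Nat) : Int) * sx) = (fy, fx) := by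
      norm_num
    have hl : List.map ((fun k : Nat => ((fy : Int) + (k : Int) * sy, fx + (k : Int) * sx)) ∘ Nat.succ)
          (List.range (d + 1))
        = List.map (fun k : Nat => ((fy + sy) + (k : Int) * sy, (fx + sx) + (k : Int) * sx))
          (List.range (d + 1)) := by
      apply List.map_congr_left
      intro k _
      simp only [Function.comp, Nat.succ_eq_add_one, Prod.mk.injEq]
      push_cast
      constructor <;> ring
    rw [hc, hl]
    rfl

theorem foldl_range_to_CF (m : Nat) (p q : Nat → Int) (g : List (List Int)) :
    (List.range m).foldl (fun g k => incr g (p k) (q k)) g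
      = CF g ((List.range m).map fun k => (p k, q k)) := by
  simp [CF, List.foldl_map]

theorem sgnB_ne_zero {a b : Int} (h : a ≠ b) : sgnB a b ≠ 0 := by
  rcases lt_or_gt_of_ne h with h' | h'
  · rw [sgnB_neg h']; decide
  · rw [sgnB_pos h']; decide

-- A's per-line update equals unit increments over B's cell list for that line
theorem stepA_eq_CF (cons : Bool) (g : List (List Int)) (line : List (String × Int × Int)) :
    stepA cons g line = CF g (cellsB cons line) := by
  rcases hf : lookupKey line "from" with _ | ⟨fx, fy⟩ <;>
    rcases ht : lookupKey line "to" with _ | ⟨tox, toy⟩ <;>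
    simp only [stepA, cellsB, hf, ht] <;> try rfl
  by_cases hx : fx = tox
  · -- vertical
    subst hx
    rw [if_pos rfl,
        if_neg (show ¬ (sgnB fx fx ≠ 0 ∧ sgnB toy fy ≠ 0 ∧ cons = false) from by
          simp [sgnB_self]),
        if_neg (show ¬ ((fx - fx).natAbs ≠ 0) from by simp), sgnB_self]
    rcases lt_trichotomy fy toy with h | h | h
    · rw [if_pos h, if_pos h, sgnB_pos h]
      rw [PySem.List.pyRange_one, PySem.List.pyRange_one, List.foldl_map, List.map_map]
      rw [foldl_range_to_CF _ (fun k => fy + (k : Int)) (fun _ => fx)]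
      rw [show ((((toy - fy).natAbs : Int) + 1 - 0).toNat) = ((toy + 1 - fy).toNat) from by omega]
      apply congrArg (CF g)
      apply List.map_congr_left
      intro k _
      norm_num
    · subst h
      rw [if_neg (show ¬ (fy < fy) from by omega), if_neg (show ¬ (fy < fy) from by omega),
          sgnB_self]
      rw [PySem.List.pyRange_one, PySem.List.pyRange_one]
      norm_num [List.range_one, CF, incr]
    · rw [if_neg (show ¬ (fy < toy) from by omega), if_neg (show ¬ (fy < toy) from by omega),
          sgnB_neg h]
      rw [PySem.List.pyRange_one, PySem.List.pyRange_one, List.foldl_map, List.map_map]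
      rw [foldl_range_to_CF _ (fun k => toy + (k : Int)) (fun _ => fx)]
      rw [show (((toy - fy).natAbs : Int) + 1 - 0).toNat = (fy + 1 - toy).toNat from by omega]
      rw [CF_range_reverse]
      apply congrArg (CF g)
      apply List.map_congr_left
      intro k hk
      rw [List.mem_range] at hk
      simp only [Function.comp, Prod.mk.injEq, mul_neg_one, mul_zero, add_zero, zero_add]
      exact ⟨by omega, trivial⟩
  · rw [if_neg hx]
    have hdx : (tox - fx).natAbs ≠ 0 := by omega
    by_cases hy : fy = toy
    · -- horizontal
      subst hy
      rw [if_pos rfl,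
          if_neg (show ¬ (sgnB tox fx ≠ 0 ∧ sgnB fy fy ≠ 0 ∧ cons = false) from by
            simp [sgnB_self]),
          if_pos hdx, sgnB_self]
      rcases lt_trichotomy fx tox with h | h | h
      · rw [if_pos h, if_pos h, sgnB_pos h]
        rw [PySem.List.pyRange_one, PySem.List.pyRange_one, List.foldl_map, List.map_map]
        rw [foldl_range_to_CF _ (fun _ => fy) (fun k => fx + (k : Int))]
        rw [show ((((tox - fx).natAbs : Int) + 1 - 0).toNat) = ((tox + 1 - fx).toNat) from by omega]
        apply congrArg (CF g)
        apply List.map_congr_left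
        intro k _
        norm_num
      · exact absurd h hx
      · rw [if_neg (show ¬ (fx < tox) from by omega), if_neg (show ¬ (fx < tox) from by omega),
            sgnB_neg h]
        rw [PySem.List.pyRange_one, PySem.List.pyRange_one, List.foldl_map, List.map_map]
        rw [foldl_range_to_CF _ (fun _ => fy) (fun k => tox + (k : Int))]
        rw [show (((tox - fx).natAbs : Int) + 1 - 0).toNat = (fx + 1 - tox).toNat from by omega]
        rw [CF_range_reverse]
        apply congrArg (CF g)
        apply List.map_congr_left
        intro k hk
        rw [List.mem_range] at hk
        simp only [Function.comp, Prod.mk.injEq, mul_neg_one, mul_zero, add_zero, zero_add]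
        exact ⟨trivial, by omega⟩
    · -- diagonal
      rw [if_neg hy]
      cases cons with
      | false =>
        rw [if_neg (show ¬ ((false : Bool) = true) from by simp),
            if_pos (show sgnB tox fx ≠ 0 ∧ sgnB toy fy ≠ 0 ∧ (false : Bool) = false from
              ⟨sgnB_ne_zero (Ne.symm hx), sgnB_ne_zero (Ne.symm hy), rfl⟩)]
        rfl
      | true =>
        rw [if_pos (show (true : Bool) = true from rfl),
            if_neg (show ¬ (sgnB tox fx ≠ 0 ∧ sgnB toy fy ≠ 0 ∧ (true : Bool) = false) from by
              simp),
            if_pos hdx]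
        set sxv : Int := if fx > tox then -1 else 1 with hsxv
        set syv : Int := if fy > toy then -1 else 1 with hsyv
        have hsor : sxv = 1 ∨ sxv = -1 := by rw [hsxv]; split <;> simp
        have hxeq : fx + ((tox - fx).natAbs : Int) * sxv = tox := by
          rw [hsxv]; rcases lt_or_gt_of_ne hx with h | h
          · rw [if_neg (show ¬ (fx > tox) from by omega)]; omega
          · rw [if_pos (show fx > tox from by omega)]; omega
        have hsx : sgnB tox fx = sxv := by
          rw [hsxv]; rcases lt_or_gt_of_ne hx with h | h
          · rw [if_neg (show ¬ (fx > tox) from by omega), sgnB_pos h]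
          · rw [if_pos (show fx > tox from by omega), sgnB_neg h]
        have hsy : sgnB toy fy = syv := by
          rw [hsyv]; rcases lt_or_gt_of_ne hy with h | h
          · rw [if_neg (show ¬ (fy > toy) from by omega), sgnB_pos h]
          · rw [if_pos (show fy > toy from by omega), sgnB_neg h]
        have h1 := diagA_eq ((tox - fx).natAbs) g fx fy sxv syv hsor
        rw [hxeq] at h1
        rw [h1]
        rw [PySem.List.pyRange_one, List.map_map]
        rw [show (((tox - fx).natAbs : Int) + 1 - 0).toNat = (tox - fx).natAbs + 1 from by omega]
        apply congrArg (CF g)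
        apply List.map_congr_left
        intro k _
        simp only [Function.comp, Prod.mk.injEq]
        rw [hsx, hsy]
        norm_num

-- A's whole run is unit increments over the concatenation of all cell lists
theorem set_lines_eq_CF (cons : Bool) (gl : List (List (String × Int × Int))) (ocean : List (List Int)) :
    set_lines ocean gl cons = CF ocean (gl.flatMap (cellsB cons)) := by
  induction gl generalizing ocean with
  | nil => rfl
  | cons l t ih =>
    show t.foldl (stepA cons) (stepA cons ocean l) = CF ocean (cellsB cons l ++ t.flatMap (cellsB cons))
    rw [CF_append, ← stepA_eq_CF]
    exact ih _

-- B-side: the counter loop of one line is the insert-add fold over cellsB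
theorem counterStep_eq (cons : Bool) (d : PySem.Dict (Int × Int) Int) (line : List (String × Int × Int)) :
    counterStep cons d line
      = (cellsB cons line).foldl (fun d c => d.insert c (d.getD c 0 + 1)) d := by
  rcases hf : lookupKey line "from" with _ | ⟨fx, fy⟩ <;>
    rcases ht : lookupKey line "to" with _ | ⟨tox, toy⟩ <;>
    simp only [counterStep, cellsB, hf, ht] <;> try rfl
  split
  · rfl
  · rw [List.foldl_map]

-- the whole counter phase is the insert-add fold over all cells
theorem counter_phase_eq (cons : Bool) (gl : List (List (String × Int × Int)))
    (d : PySem.Dict (Int × Int) Int) :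
    gl.foldl (counterStep cons) d
      = (gl.flatMap (cellsB cons)).foldl (fun d c => d.insert c (d.getD c 0 + 1)) d := by
  induction gl generalizing d with
  | nil => rfl
  | cons l t ih =>
    show t.foldl (counterStep cons) (counterStep cons d l) = _
    rw [List.flatMap_cons, List.foldl_append, ← counterStep_eq, ih]

theorem bumpRowBy_zero (r : List Int) (j : Nat) : bumpRowBy r j 0 = r := by
  induction r generalizing j with
  | nil => rfl
  | cons a t ih => cases j <;> simp [bumpRowBy, ih]

theorem bumpGridBy_zero (g : List (List Int)) (j jx : Nat) : bumpGridBy g j jx 0 = g := by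
  induction g generalizing j with
  | nil => rfl
  | cons r t ih => cases j <;> simp [bumpGridBy, bumpRowBy_zero, ih]

theorem bumpRowBy_succ (r : List Int) (j : Nat) (c : Int) :
    bumpRowBy r j (c + 1) = bumpRowBy (bumpRow r j) j c := by
  induction r generalizing j with
  | nil => rfl
  | cons a t ih =>
    cases j with
    | zero => simp [bumpRowBy, bumpRow]; ring
    | succ n => simp [bumpRowBy, bumpRow, ih]

theorem bumpGridBy_succ (g : List (List Int)) (j jx : Nat) (c : Int) :
    bumpGridBy g j jx (c + 1) = bumpGridBy (bumpGrid g j jx) j jx c := by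
  induction g generalizing j with
  | nil => rfl
  | cons r t ih => cases j <;> simp [bumpGridBy, bumpGrid, bumpRowBy_succ, ih]

-- 'ocean[y][x] += n' = n unit increments at (y, x)
theorem addCell_eq_none1 {g : List (List Int)} {y : Int} (x c : Int)
    (h : pyIdxN g.length y = none) : addCell g y x c = g := by simp [addCell, h]

theorem addCell_eq_none2 {g : List (List Int)} {y x : Int} (c : Int) {j : Nat}
    (h1 : pyIdxN g.length y = some j) (h2 : pyIdxN (g.getD j []).length x = none) :
    addCell g y x c = g := by unfold addCell; rw [h1]; dsimp only; rw [h2]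

theorem addCell_eq_some {g : List (List Int)} {y x : Int} (c : Int) {j jx : Nat}
    (h1 : pyIdxN g.length y = some j) (h2 : pyIdxN (g.getD j []).length x = some jx) :
    addCell g y x c = bumpGridBy g j jx c := by unfold addCell; rw [h1]; dsimp only; rw [h2]

theorem addCell_eq_CF_replicate (g : List (List Int)) (y x : Int) (n : Nat) :
    addCell g y x (n : Int) = CF g (List.replicate n (y, x)) := by
  induction n generalizing g with
  | zero =>
    cases h1 : pyIdxN g.length y with
    | none => rw [addCell_eq_none1 x _ h1]; rfl
    | some j =>
      cases h2 : pyIdxN (g.getD j []).length x with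
      | none => rw [addCell_eq_none2 _ h1 h2]; rfl
      | some jx =>
        rw [addCell_eq_some _ h1 h2]
        show bumpGridBy g j jx 0 = g
        exact bumpGridBy_zero g j jx
  | succ n ih =>
    rw [List.replicate_succ]
    show addCell g y x ((n : Int) + 1) = CF (incr g y x) (List.replicate n (y, x))
    rw [← ih (incr g y x)]
    cases h1 : pyIdxN g.length y with
    | none =>
      rw [incr_eq_none1 x h1, addCell_eq_none1 x _ h1, addCell_eq_none1 x _ h1]
    | some j =>
      cases h2 : pyIdxN (g.getD j []).length x with
      | none =>
        rw [incr_eq_none2 h1 h2, addCell_eq_none2 _ h1 h2, addCell_eq_none2 _ h1 h2]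
      | some jx =>
        have h1' : pyIdxN (bumpGrid g j jx).length y = some j := by
          rw [bumpGrid_length]; exact h1
        have h2' : pyIdxN ((bumpGrid g j jx).getD j []).length x = some jx := by
          rw [bumpGrid_row_length]; exact h2
        rw [incr_eq_some h1 h2, addCell_eq_some _ h1 h2, addCell_eq_some _ h1' h2',
            bumpGridBy_succ]

-- counting cells in the expanded (deduped) cell list
theorem count_flatMap_replicate (ds : List (Int × Int)) (n : Int × Int → Nat) (a : Int × Int)
    (hnd : ds.Nodup) :
    (ds.flatMap (fun c => List.replicate (n c) c)).count a = if a ∈ ds then n a else 0 := by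
  induction ds with
  | nil => simp
  | cons c t ih =>
    rcases List.nodup_cons.1 hnd with ⟨hc, ht⟩
    rw [List.flatMap_cons, List.count_append, List.count_replicate, ih ht]
    by_cases hac : a = c
    · subst hac
      simp [hc]
    · simp [hac, Ne.symm hac]

-- the cell list is a permutation of its count expansion over the distinct cells
theorem perm_expansion (l : List (Int × Int)) :
    l.Perm ((PySem.Set.ofList l).flatMap (fun c => List.replicate (l.count c) c)) := by
  rw [List.perm_iff_count]
  intro a
  rw [count_flatMap_replicate _ _ _ (PySem.Set.nodup_ofList l)]
  by_cases h : a ∈ l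
  · simp [PySem.Set.mem_ofList, h]
  · simp [PySem.Set.mem_ofList, h, List.count_eq_zero_of_not_mem h]

-- applying the counter's items equals unit increments over the original cell list
theorem apply_counter_eq_CF (l : List (Int × Int)) (g : List (List Int)) :
    (PySem.Dict.counter l).items.foldl (fun g p => addCell g p.1.1 p.1.2 p.2) g = CF g l := by
  rw [PySem.Dict.items_counter, List.foldl_map]
  have hexp : ∀ (ds : List (Int × Int)) (g : List (List Int)),
      ds.foldl (fun g c => addCell g c.1 c.2 ((l.count c : Nat) : Int)) g
        = CF g (ds.flatMap (fun c => List.replicate (l.count c) c)) := by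
    intro ds
    induction ds with
    | nil => intro g; rfl
    | cons c t ih =>
      intro g
      rw [List.foldl_cons, List.flatMap_cons, CF_append, ← addCell_eq_CF_replicate, ih]
  rw [hexp]
  exact (CF_perm g (perm_expansion l)).symm

-- ===== VERDICT (by name: the statement is the Claim_ definition above) =====
theorem set_lines_spec : Claim_equal_set_lines := by
  intro ocean gl cons _ _
  unfold Spec_set_lines set_lines_alt
  rw [counter_phase_eq, PySem.Dict.foldl_insert_getD_add_one_eq_counter,
      apply_counter_eq_CF, set_lines_eq_CF]
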